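-- pv_equiv track=rewrite | github.com/HeoYou/algorithm-python | 프로그래머스 정렬.py | solution
-- ===== SOURCE A (Python) =====
-- def solution(numbers):
--
--     answer = 0
--     numbers.sort()
--     numbers.reverse()
--
--     data = [[idx, i] for idx, i in enumerate(numbers)]
--
--     if data[len(data) - 1][0] < data[len(data) - 1][1]:
--         return data[len(data) - 1][0] + 1
--
--     for idx, i in data:
--         if idx >= i:
--             return idx
--
--
--     return answer
-- ===== SOURCE B (Python) =====
-- def solution(numbers):
--     # O(n) bucket counting (h-index style), no sort; does not mutate numbers
--     # (A sorts its argument in place; the equivalence is about the return value).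
--     n = len(numbers)
--     buckets = [0] * (n + 1)
--     for v in numbers:
--         if v >= n:
--             buckets[n] += 1
--         elif v > 0:
--             buckets[v] += 1
--     total = 0
--     for h in range(n, 0, -1):
--         total += buckets[h]
--         if total >= h:
--             return h
--     return 0
-- ===== Notes on version B (the rewrite author's own statement) =====
-- stated objective: faster
-- what changed: Replaces A's sort-descending + sentinel check + linear scan for the first index i with i >= numbers[i] by an O(n) bucket-counting (h-index) computation: count values into buckets clamped at n, then scan h from n down and return the first h whose suffix count reaches h; B does not sort and does not mutate the argument.
-- crash fix: On the empty list A raises IndexError at data[len(data)-1]; B returns 0. — e.g. on solution([]): A raises IndexError, B returns 0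
import Mathlib
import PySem

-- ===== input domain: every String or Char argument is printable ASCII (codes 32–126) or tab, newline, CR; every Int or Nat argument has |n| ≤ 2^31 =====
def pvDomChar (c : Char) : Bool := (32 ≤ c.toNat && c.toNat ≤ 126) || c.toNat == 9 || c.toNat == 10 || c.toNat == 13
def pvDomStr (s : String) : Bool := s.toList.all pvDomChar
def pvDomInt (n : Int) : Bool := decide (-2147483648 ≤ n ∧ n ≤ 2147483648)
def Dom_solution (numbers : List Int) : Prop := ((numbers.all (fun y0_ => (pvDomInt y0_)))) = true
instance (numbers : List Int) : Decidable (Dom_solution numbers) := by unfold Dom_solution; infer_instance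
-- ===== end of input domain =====

-- B replaces A's descending sort + sentinel check + linear scan for the first index i with
-- i >= numbers[i] by an O(n) bucket-counting (h-index style) computation with no sort.
-- A sorts its argument list in place in Python, B does not mutate it; the theorems here are
-- about the return value only.

-- ===== PORT A =====
-- the 'for idx, i in data: if idx >= i: return idx' loop; 'answer' (= 0) is the fall-through value
def solutionLoop : List (Int × Int) → Int → Int
  | [], answer => answer
  | (idx, i) :: rest, answer => if idx ≥ i then idx else solutionLoop rest answer

def solution (numbers : List Int) : Int :=
  let answer : Int := 0
  let sortedNums := (PySem.List.sorted numbers id).reverse   -- numbers.sort(); numbers.reverse()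
  let data := PySem.List.enumerate sortedNums                -- [[idx, i] for idx, i in enumerate(numbers)]
  match PySem.List.pyGet? data ((data.length : Int) - 1) with
  | none => answer                                           -- data[len(data)-1] raises IndexError here (excluded by Pre_)
  | some last =>
    if last.1 < last.2 then last.1 + 1
    else solutionLoop data answer

-- ===== PORT B =====
-- the 'for v in numbers' bucket-filling loop
def buildBuckets (n : Nat) (numbers : List Int) : List Int :=
  numbers.foldl (fun b v =>
    if v ≥ (n : Int) then b.set n (b.getD n 0 + 1)
    else if v > 0 then b.set v.toNat (b.getD v.toNat 0 + 1)
    else b) (List.replicate (n + 1) 0)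

-- the 'for h in range(n, 0, -1)' loop; the trailing 'return 0' is the base case
def bLoop (buckets : List Int) : Int → Nat → Int
  | _total, 0 => 0
  | total, h + 1 =>
    let t := total + buckets.getD (h + 1) 0
    if t ≥ ((h : Int) + 1) then ((h : Int) + 1) else bLoop buckets t h

def solution_alt (numbers : List Int) : Int :=
  let n := numbers.length
  bLoop (buildBuckets n numbers) 0 n

-- ===== PRECONDITION & SPEC =====
-- Pre_ excludes only the empty list, on which A raises IndexError at data[len(data)-1].
def Pre_solution (numbers : List Int) : Prop := numbers ≠ []
instance (numbers : List Int) : Decidable (Pre_solution numbers) := by unfold Pre_solution; infer_instance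
def pvWitness_solution : List Int := ([1, 5, 2])

-- On the empty list A raises IndexError at data[len(data)-1]; B returns 0.
def Raises_solution (numbers : List Int) : Prop := numbers = []
instance (numbers : List Int) : Decidable (Raises_solution numbers) := by unfold Raises_solution; infer_instance
def pvRaiseWitness_solution : List Int := ([])
def pvRaiseWitnessOut_solution : Int := 0

def Spec_solution (numbers : List Int) (out : Int) : Prop := out = solution_alt numbers
instance (numbers : List Int) (out : Int) : Decidable (Spec_solution numbers out) := by unfold Spec_solution; infer_instance

-- ===== CLAIM (what is proved, stated in full; the proofs are below) =====
def Claim_equal_solution : Prop := ∀ (numbers : List Int), Dom_solution numbers → Pre_solution numbers → Spec_solution numbers (solution numbers)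
def Claim_raises_solution : Prop := (∀ (numbers : List Int), Dom_solution numbers → Raises_solution numbers → ¬ Pre_solution numbers) ∧ (Dom_solution (pvRaiseWitness_solution) ∧ Raises_solution (pvRaiseWitness_solution) ∧ solution_alt (pvRaiseWitness_solution) = pvRaiseWitnessOut_solution)

-- ===== LEMMAS AND PROOFS =====

-- ---- A-side: A computes the number N of indices i with i < s[i] over the descending sort s

-- B's count over elements below the first hit is one per element
lemma countP_eq_zero_of_le {t : List Int} {c k : Int} (hub : ∀ x ∈ t, x ≤ c) (hck : c ≤ k) :
    List.countP (fun p => decide (p.1 < p.2)) (PySem.List.enumerate t (k + 1)) = 0 := by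
  induction t generalizing k with
  | nil => simp [PySem.List.enumerate]
  | cons v t ih =>
    rw [PySem.List.enumerate_cons, List.countP_cons]
    have hv : v ≤ c := hub v (by simp)
    have h0 : (decide ((k + 1 : Int) < v)) = false := by simp; omega
    simp only [h0]
    have := ih (k := k + 1) (fun x hx => hub x (by simp [hx])) (by omega)
    simpa using this

-- if the last (smallest) element still exceeds its index, every index counts
lemma countP_eq_length_of_last_gt {s : List Int} (hne : s ≠ [])
    (hdesc : s.Pairwise (fun a b => b ≤ a)) {k : Int}
    (hl : k + s.length - 1 < s.getLast hne) :
    (List.countP (fun p => decide (p.1 < p.2)) (PySem.List.enumerate s k) : Int) = s.length := by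
  induction s generalizing k with
  | nil => exact absurd rfl hne
  | cons v t ih =>
    rw [PySem.List.enumerate_cons, List.countP_cons]
    rcases List.eq_nil_or_concat' t with h | ⟨t', x, rfl⟩
    · subst h
      simp only [List.getLast_singleton, List.length_cons, List.length_nil] at hl
      have : (decide (k < v)) = true := by simp; omega
      simp [PySem.List.enumerate, this]
    · have ht : (t' ++ [x]) ≠ [] := by simp
      have hlast : (v :: (t' ++ [x])).getLast hne = (t' ++ [x]).getLast ht :=
        List.getLast_cons ht
      rw [hlast] at hl
      have hxv : (t' ++ [x]).getLast ht ≤ v := by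
        have := (List.pairwise_cons.mp hdesc).1
        exact this _ (List.getLast_mem ht)
      have hk : (decide (k < v)) = true := by
        simp only [List.length_cons] at hl; push_cast at hl; simp; omega
      have := ih ht (List.pairwise_cons.mp hdesc).2 (k := k + 1)
        (by simp only [List.length_cons] at hl ⊢; push_cast at hl ⊢; omega)
      simp only [hk, List.length_cons]
      push_cast
      omega

-- A's loop finds the first index with idx ≥ value; by descending order that
-- first index equals the number of indices with idx < value.
lemma loop_eq_add_countP {s : List Int} (hne : s ≠ [])
    (hdesc : s.Pairwise (fun a b => b ≤ a)) {k : Int}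
    (hl : s.getLast hne ≤ k + s.length - 1) :
    solutionLoop (PySem.List.enumerate s k) 0
      = k + (List.countP (fun p => decide (p.1 < p.2)) (PySem.List.enumerate s k) : Int) := by
  induction s generalizing k with
  | nil => exact absurd rfl hne
  | cons v t ih =>
    rw [PySem.List.enumerate_cons, List.countP_cons, solutionLoop]
    by_cases hkv : k ≥ v
    · have h0 : (decide (k < v)) = false := by simp; omega
      have hub : ∀ x ∈ t, x ≤ v := (List.pairwise_cons.mp hdesc).1
      rw [if_pos hkv, h0, countP_eq_zero_of_le hub hkv]
      simp
    · rcases List.eq_nil_or_concat' t with h | ⟨t', x, rfl⟩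
      · subst h
        simp only [List.getLast_singleton, List.length_cons, List.length_nil] at hl
        omega
      · have ht : (t' ++ [x]) ≠ [] := by simp
        have hlast : (v :: (t' ++ [x])).getLast hne = (t' ++ [x]).getLast ht :=
          List.getLast_cons ht
        rw [hlast] at hl
        have h1 : (decide (k < v)) = true := by simp; omega
        rw [if_neg hkv, h1]
        have := ih ht (List.pairwise_cons.mp hdesc).2 (k := k + 1)
          (by simp only [List.length_cons] at hl ⊢; push_cast at hl ⊢; omega)
        rw [this]
        simp
        omega

-- A's return value is exactly N
lemma A_eq_countP (numbers : List Int) (hpre : numbers ≠ []) :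
    solution numbers
      = (List.countP (fun p => decide (p.1 < p.2))
          (PySem.List.enumerate ((PySem.List.sorted numbers id).reverse) 0) : Int) := by
  dsimp only [solution]
  set s := (PySem.List.sorted numbers id).reverse with hs
  have hne : s ≠ [] := by
    have : s.length = numbers.length := by
      rw [hs, List.length_reverse]
      exact (PySem.List.sorted_perm numbers id false).length_eq
    intro h; rw [h] at this; exact hpre (List.length_eq_zero_iff.mp this.symm)
  have hdesc : s.Pairwise (fun a b : Int => b ≤ a) := by
    rw [hs, List.pairwise_reverse]
    exact PySem.List.sorted_pairwise numbers id
  have hlen : (PySem.List.enumerate s).length = s.length := PySem.List.length_enumerate s 0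
  have hslen : 0 < s.length := List.length_pos_iff.mpr hne
  have hget : PySem.List.pyGet? (PySem.List.enumerate s)
      (((PySem.List.enumerate s).length : Int) - 1)
      = some ((0 + (s.length - 1 : Nat) : Int), s.getLast hne) := by
    rw [PySem.List.pyGet?_of_nonneg (PySem.List.enumerate s)
      (i := ((PySem.List.enumerate s).length : Int) - 1) (by rw [hlen]; omega)]
    have hidx : (((PySem.List.enumerate s).length : Int) - 1).toNat = s.length - 1 := by
      rw [hlen]; omega
    rw [hidx, List.getElem?_eq_getElem (by omega)]
    rw [PySem.List.getElem_enumerate s 0 (s.length - 1) (by omega)]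
    rw [List.getLast_eq_getElem hne]
  rw [hget]
  simp only
  by_cases hc : (0 + ((s.length - 1 : Nat) : Int)) < s.getLast hne
  · rw [if_pos hc]
    have : (List.countP (fun p => decide (p.1 < p.2)) (PySem.List.enumerate s 0) : Int)
        = s.length := by
      apply countP_eq_length_of_last_gt hne hdesc
      omega
    rw [this]
    omega
  · rw [if_neg hc]
    have := loop_eq_add_countP hne hdesc (k := 0) (by omega)
    rw [this]
    omega

-- ---- generic counting lemmas

lemma suffsum_set (l : List Int) (i h : Nat) (x : Int) (hi : i < l.length) :
    ((l.set i x).drop h).sum = (l.drop h).sum + (if h ≤ i then x - l.getD i 0 else 0) := by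
  induction l generalizing i h with
  | nil => simp at hi
  | cons a t ih =>
    cases i with
    | zero =>
      cases h with
      | zero => simp; ring
      | succ h' => simp
    | succ j =>
      have hj : j < t.length := by simpa using hi
      cases h with
      | zero =>
        have := ih j 0 hj
        simp at this
        simp [this]
        ring
      | succ h' =>
        have := ih j h' hj
        simp [this]

lemma countP_eq_countP_range (q : Int → Bool) (l : List Int) :
    l.countP q = (List.range l.length).countP (fun i => q (l.getD i 0)) := by
  induction l with
  | nil => simp
  | cons a t ih =>
    rw [List.countP_cons, List.length_cons, List.range_succ_eq_map, List.countP_cons,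
      List.countP_map, ih]
    have : ((fun i => q ((a :: t)[i]?.getD 0)) ∘ Nat.succ) = (fun (i : Nat) => q (t[i]?.getD 0)) := by
      funext i; simp
    simp [this]

lemma countP_enum (s : List Int) (k : Int) :
    List.countP (fun p => decide (p.1 < p.2)) (PySem.List.enumerate s k)
      = (List.range s.length).countP (fun (i : Nat) => decide (k + (i : Int) < s.getD i 0)) := by
  induction s generalizing k with
  | nil => simp [PySem.List.enumerate]
  | cons a t ih =>
    rw [PySem.List.enumerate_cons, List.countP_cons, List.length_cons,
      List.range_succ_eq_map, List.countP_cons, List.countP_map, ih (k + 1)]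
    have : ((fun (i : Nat) => decide (k + (i:Int) < (a :: t)[i]?.getD 0)) ∘ Nat.succ)
        = (fun (i : Nat) => decide (k + 1 + (i:Int) < t[i]?.getD 0)) := by
      funext i
      simp
      constructor <;> intro <;> omega
    simp [this]

lemma countP_range_prefix (n : Nat) (p : Nat → Bool)
    (hdc : ∀ i j, j ≤ i → i < n → p i = true → p j = true) :
    ∀ i, i < n → (p i = true ↔ i < (List.range n).countP p) := by
  induction n with
  | zero => intro i h; omega
  | succ n ih =>
    intro i hi
    rw [List.range_succ, List.countP_append]
    by_cases hpn : p n = true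
    · have hall : ∀ j, j < n → p j = true := fun j hj => hdc n j (by omega) (by omega) hpn
      have : (List.range n).countP p = n := by
        rw [List.countP_eq_length.mpr (by intro a ha; exact hall a (List.mem_range.mp ha))]
        simp
      simp [this, hpn]
      rcases Nat.lt_succ_iff_lt_or_eq.mp hi with h | h
      · simp [hall i h]; omega
      · subst h; simp [hpn]
    · have hc : (List.range n).countP p ≤ n := le_trans List.countP_le_length (by simp)
      simp only [List.countP_cons, hpn, List.countP_nil]
      simp only [Bool.false_eq_true, if_false, Nat.add_zero]
      rcases Nat.lt_succ_iff_lt_or_eq.mp hi with h | h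
      · exact ih (fun i j hji hin => hdc i j hji (by omega)) i h
      · subst h; simp [hpn]; omega

lemma foldl_buckets_length (n : Nat) (l : List Int) (b : List Int) :
    (l.foldl (fun b v =>
      if v ≥ (n : Int) then b.set n (b.getD n 0 + 1)
      else if v > 0 then b.set v.toNat (b.getD v.toNat 0 + 1)
      else b) b).length = b.length := by
  induction l generalizing b with
  | nil => rfl
  | cons v l ih =>
    rw [List.foldl_cons, ih]
    split_ifs <;> simp

lemma length_buildBuckets (n : Nat) (l : List Int) : (buildBuckets n l).length = n + 1 := by
  rw [buildBuckets, foldl_buckets_length]; simp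

lemma suff_foldl (n : Nat) (l : List Int) (h : Nat) (h1 : 1 ≤ h) (hn : h ≤ n) :
    ∀ b : List Int, b.length = n + 1 →
    (((l.foldl (fun b v =>
      if v ≥ (n : Int) then b.set n (b.getD n 0 + 1)
      else if v > 0 then b.set v.toNat (b.getD v.toNat 0 + 1)
      else b) b).drop h).sum)
      = ((b.drop h).sum) + (l.countP (fun v => decide ((h : Int) ≤ v)) : Int) := by
  induction l with
  | nil => intro b hb; simp
  | cons v l ih =>
    intro b hb
    rw [List.foldl_cons, List.countP_cons]
    by_cases hv : v ≥ (n : Int)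
    · rw [if_pos hv, ih _ (by rw [List.length_set]; exact hb)]
      rw [suffsum_set _ _ _ _ (by omega)]
      have hle : h ≤ n := hn
      have hp : (decide ((h : Int) ≤ v)) = true := by simp; omega
      simp [hle, hp]
      ring
    · rw [if_neg hv]
      by_cases hv2 : v > 0
      · rw [if_pos hv2, ih _ (by rw [List.length_set]; exact hb)]
        have hvn : v.toNat < b.length := by rw [hb]; omega
        rw [suffsum_set _ _ _ _ hvn]
        by_cases hh : h ≤ v.toNat
        · have hp : (decide ((h : Int) ≤ v)) = true := by simp; omega
          simp [hh, hp]
          ring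
        · have hp : (decide ((h : Int) ≤ v)) = false := by simp; omega
          simp [hh, hp]
      · rw [if_neg hv2, ih _ hb]
        have hp : (decide ((h : Int) ≤ v)) = false := by simp; omega
        simp [hp]

lemma suff_buildBuckets (n : Nat) (l : List Int) (h : Nat) (h1 : 1 ≤ h) (hn : h ≤ n) :
    ((buildBuckets n l).drop h).sum = (l.countP (fun v => decide ((h : Int) ≤ v)) : Int) := by
  rw [buildBuckets, suff_foldl n l h h1 hn _ (by simp)]
  have : ((List.replicate (n + 1) (0:Int)).drop h).sum = 0 := by
    rw [List.drop_replicate]; simp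
  rw [this, zero_add]

lemma bLoop_min (b : List Int) (n N : Nat) (hlen : b.length = n + 1) (_hN : N ≤ n)
    (hiff : ∀ k, 1 ≤ k → k ≤ n → (((k : Int) ≤ (b.drop k).sum) ↔ k ≤ N)) :
    ∀ h, h ≤ n → ∀ total, total = (b.drop (h + 1)).sum → bLoop b total h = (min h N : Nat) := by
  intro h
  induction h with
  | zero => intro _ total _; simp [bLoop]
  | succ h ih =>
    intro hh total htot
    rw [bLoop]
    have hin : h + 1 < b.length := by omega
    have hg : b.getD (h + 1) 0 = b[h + 1] := List.getD_eq_getElem b 0 hin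
    have hdrop : b.drop (h + 1) = b[h + 1] :: b.drop (h + 2) := List.drop_eq_getElem_cons hin
    have ht : total + b.getD (h + 1) 0 = (b.drop (h + 1)).sum := by
      rw [htot, hg, hdrop, List.sum_cons]; ring
    simp only [ht]
    by_cases hc : ((h : Int) + 1) ≤ (b.drop (h + 1)).sum
    · rw [if_pos hc]
      have : h + 1 ≤ N := by
        have := (hiff (h + 1) (by omega) (by omega)).mp (by push_cast; exact hc)
        omega
      have : min (h + 1) N = h + 1 := by omega
      rw [this]; push_cast; ring
    · rw [if_neg hc]
      have hNh : N ≤ h := by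
        by_contra hcon
        exact hc (by exact (hiff (h + 1) (by omega) (by omega)).mpr (by omega))
      have := ih (by omega) _ rfl
      rw [this]
      congr 1
      omega

-- ===== VERDICT (by name: the statement is the Claim_ definition above) =====
theorem solution_spec : Claim_equal_solution := by
  intro numbers _ hpre
  unfold Spec_solution
  set s := (PySem.List.sorted numbers id).reverse with hs
  have hperm : s.Perm numbers := (List.reverse_perm _).trans (PySem.List.sorted_perm numbers id false)
  have hsn : s.length = numbers.length := hperm.length_eq
  have hdesc : s.Pairwise (fun a b : Int => b ≤ a) := by
    rw [hs, List.pairwise_reverse]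
    exact PySem.List.sorted_pairwise numbers id
  have hmono : ∀ i j : Nat, j ≤ i → i < s.length → s.getD i 0 ≤ s.getD j 0 := by
    intro i j hji hi
    rcases Nat.eq_or_lt_of_le hji with rfl | hlt
    · exact le_refl _
    · rw [List.getD_eq_getElem s 0 hi, List.getD_eq_getElem s 0 (by omega)]
      exact (List.pairwise_iff_getElem.mp hdesc) j i (by omega) hi hlt
  set n := numbers.length with hn
  set p : Nat → Bool := fun i => decide ((i : Int) < s.getD i 0) with hp
  set N := (List.range n).countP p with hN
  have hNn : N ≤ n := by
    rw [hN]
    exact le_trans List.countP_le_length (by simp)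
  have hpdc : ∀ i j, j ≤ i → i < n → p i = true → p j = true := by
    intro i j hji hi hpi
    simp only [hp, decide_eq_true_eq] at hpi ⊢
    have := hmono i j hji (by omega)
    omega
  have hchar := countP_range_prefix n p hpdc
  -- A's value is N
  have hA : solution numbers = (N : Int) := by
    rw [A_eq_countP numbers hpre, ← hs, countP_enum s 0, hsn, hN, hp]
    congr 1
    apply List.countP_congr
    intro i _
    simp
  -- B's value is N
  set b := buildBuckets n numbers with hb
  have hiff : ∀ k, 1 ≤ k → k ≤ n → (((k : Int) ≤ (b.drop k).sum) ↔ k ≤ N) := by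
    intro k hk1 hkn
    rw [hb, suff_buildBuckets n numbers k hk1 hkn]
    rw [← hperm.countP_eq, countP_eq_countP_range, hsn]
    set q : Nat → Bool := fun i => decide ((k : Int) ≤ s.getD i 0) with hq
    have hqdc : ∀ i j, j ≤ i → i < n → q i = true → q j = true := by
      intro i j hji hi hqi
      simp only [hq, decide_eq_true_eq] at hqi ⊢
      have := hmono i j hji (by omega)
      omega
    have hq1 := countP_range_prefix n q hqdc (k - 1) (by omega)
    have hp1 := hchar (k - 1) (by omega)
    have hqc : (List.range n).countP q ≤ n := le_trans List.countP_le_length (by simp)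
    have hpq : q (k - 1) = p (k - 1) := by
      simp only [hq, hp, decide_eq_decide]
      have : ((k - 1 : Nat) : Int) = (k : Int) - 1 := by omega
      rw [this]
      constructor <;> intro <;> omega
    rw [hpq] at hq1
    constructor
    · intro h
      have hkq : k ≤ (List.range n).countP q := by exact_mod_cast h
      have := hp1.mp (hq1.mpr (by omega))
      omega
    · intro h
      have := hq1.mp (hp1.mpr (by omega))
      have hkq : k ≤ (List.range n).countP q := by omega
      exact_mod_cast hkq
  have hB : solution_alt numbers = (N : Int) := by
    dsimp only [solution_alt]
    rw [← hn, ← hb]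
    have hlen : b.length = n + 1 := by rw [hb]; exact length_buildBuckets n numbers
    have h0 : (0 : Int) = (b.drop (n + 1)).sum := by
      rw [List.drop_of_length_le (by omega)]; rfl
    rw [bLoop_min b n N hlen hNn hiff n (le_refl n) 0 h0]
    have : min n N = N := by omega
    rw [this]
  rw [hA, hB]

@[simp] theorem solution_raises : Claim_raises_solution := by
  unfold Claim_raises_solution
  exact ⟨fun numbers _ hr hp => hp hr, by decide⟩
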